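-- pv_equiv track=rewrite | github.com/mariia55/emergent-abstractions_biased | utils/analysis_tools_lazimpa.py | optimal_coding
-- ===== SOURCE A (Python) =====
-- def optimal_coding(vocab_size,nr_messages):
--     """ calculates optimal coding
--
--     :param vocab_size: how many values each position in a message can have
--     :param nr_messages: how many messages to calculate
--     """
--     output = [0,]
--
--     l = 1
--     while len(output) < nr_messages:
--         for _ in range(vocab_size**l):
--             output.append(l)
--         l += 1
--
--     return output[:nr_messages]
-- ===== SOURCE B (Python) =====
-- def optimal_coding(vocab_size, nr_messages):
--     """Rank decoding: the i-th optimal message length is computed independently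
--     from the index i by peeling off level sizes vocab_size**l from i, so the
--     result is a map over range(nr_messages) with no shared growing buffer."""
--     def level(i):
--         l = 0
--         while i >= vocab_size ** l:
--             i -= vocab_size ** l
--             l += 1
--         return l
--     return [level(i) for i in range(nr_messages)]
-- ===== Notes on version B (the rewrite author's own statement) =====
-- stated objective: alternative
-- what changed: B computes each output element independently by rank decoding: the length of message i is found by peeling level sizes vocab_size**l off the index i, mapped over range(nr_messages), instead of A's sequential generation that appends whole vocab_size**l blocks to a growing buffer and truncates with a slice.
-- outside the precondition, e.g. on optimal_coding(-2, 5): A returns [0, 2, 2, 2, 2], B returns [0, 2, 2, 4, 4]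
import Mathlib
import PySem

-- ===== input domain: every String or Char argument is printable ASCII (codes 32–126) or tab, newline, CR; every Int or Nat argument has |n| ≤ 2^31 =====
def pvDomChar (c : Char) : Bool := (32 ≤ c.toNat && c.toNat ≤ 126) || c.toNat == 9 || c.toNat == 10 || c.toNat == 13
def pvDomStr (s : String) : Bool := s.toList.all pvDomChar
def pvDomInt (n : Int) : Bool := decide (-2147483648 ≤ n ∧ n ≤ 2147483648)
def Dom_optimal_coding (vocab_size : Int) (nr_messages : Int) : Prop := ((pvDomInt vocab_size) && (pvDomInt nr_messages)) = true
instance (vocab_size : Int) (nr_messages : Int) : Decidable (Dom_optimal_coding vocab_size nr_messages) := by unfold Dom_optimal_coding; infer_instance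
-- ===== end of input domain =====

-- B computes each element independently by rank-decoding its index instead of A's
-- sequential block generation plus truncation (objective: alternative).

-- ===== PORT A =====
-- A's while loop; fuel only makes it total (on Pre_ inputs the loop always terminates
-- with this much fuel); `for _ in range(vocab_size**l): output.append(l)` appends
-- (vocab_size**l) copies of l (none when the power is ≤ 0, as range() is then empty)
def pvALoop (vocab_size : Int) (nr_messages : Int) : Nat → List Int → Nat → List Int
  | 0, output, _ => output
  | fuel+1, output, l =>
    if (output.length : Int) < nr_messages then
      pvALoop vocab_size nr_messages fuel
        (output ++ List.replicate ((vocab_size ^ l).toNat) (l : Int)) (l + 1)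
    else output

def optimal_coding (vocab_size : Int) (nr_messages : Int) : List Int :=
  PySem.List.slice (pvALoop vocab_size nr_messages (2 * nr_messages.toNat + 3) [0] 1)
    none (some nr_messages)

-- ===== PORT B =====
-- B's inner `level(i)`: peel level sizes vocab_size**l off the index i; fuel i+1 is
-- enough on Pre_ inputs (each iteration removes at least 1 from i when vocab_size ≥ 1)
def pvLevel (vocab_size : Int) : Nat → Int → Nat → Int
  | 0, _, l => (l : Int)
  | fuel+1, i, l =>
    if vocab_size ^ l ≤ i then pvLevel vocab_size fuel (i - vocab_size ^ l) (l + 1)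
    else (l : Int)

-- B's comprehension `[level(i) for i in range(nr_messages)]`
def optimal_coding_alt (vocab_size : Int) (nr_messages : Int) : List Int :=
  (List.range nr_messages.toNat).map (fun i => pvLevel vocab_size (i + 1) (i : Int) 0)

-- ===== PRECONDITION & SPEC =====
-- Pre_ restricts vocab_size to the natural domain vocab_size ≥ 1 (except for the trivial
-- nr_messages ≤ 1, where the loop body never runs): for vocab_size = 0 with nr_messages ≥ 2
-- the Python A loops forever, and for negative vocab_size (a meaningless number of symbol
-- values) A's output, made of the even-power blocks only because range() of a negative
-- count is empty, is an implementation artefact B does not reproduce.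
def Pre_optimal_coding (vocab_size : Int) (nr_messages : Int) : Prop :=
  nr_messages ≤ 1 ∨ 1 ≤ vocab_size
instance (vocab_size : Int) (nr_messages : Int) : Decidable (Pre_optimal_coding vocab_size nr_messages) := by unfold Pre_optimal_coding; infer_instance

def pvWitness_optimal_coding : Int × Int := (2, 10)

def Spec_optimal_coding (vocab_size : Int) (nr_messages : Int) (out : List Int) : Prop := out = optimal_coding_alt vocab_size nr_messages
instance (vocab_size : Int) (nr_messages : Int) (out : List Int) : Decidable (Spec_optimal_coding vocab_size nr_messages out) := by unfold Spec_optimal_coding; infer_instance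

-- ===== CLAIM (what is proved, stated in full; the proofs are below) =====
def Claim_equal_optimal_coding : Prop := ∀ (vocab_size : Int) (nr_messages : Int), Dom_optimal_coding vocab_size nr_messages → Pre_optimal_coding vocab_size nr_messages → Spec_optimal_coding vocab_size nr_messages (optimal_coding vocab_size nr_messages)

-- ===== LEMMAS AND PROOFS =====

-- concatenation of the blocks l, l+1, …, l+F-1, block l = the value l repeated (v^l).toNat times
def pvCat (v : Int) : Nat → Nat → List Int
  | _, 0 => []
  | l, F+1 => List.replicate ((v ^ l).toNat) (l : Int) ++ pvCat v (l + 1) F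

theorem pvCat_len_ge (v : Int) (hv : 1 ≤ v) : ∀ (F l : Nat), F ≤ (pvCat v l F).length := by
  intro F
  induction F with
  | zero => intro l; simp [pvCat]
  | succ F ih =>
    intro l
    have hpow : (1 : Int) ≤ v ^ l := one_le_pow₀ hv
    have := ih (l + 1)
    simp only [pvCat, List.length_append, List.length_replicate]
    omega

-- A's result: take n of the concatenation of enough whole blocks
theorem pvALoop_take (v n : Int) :
    ∀ (f : Nat) (F : Nat) (o : List Int) (l : Nat),
      n.toNat ≤ o.length + (pvCat v l F).length → F + 1 ≤ f →
      (pvALoop v n f o l).take n.toNat = (o ++ pvCat v l F).take n.toNat := by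
  intro f
  induction f with
  | zero => intro F o l _ h2; omega
  | succ f ih =>
    intro F o l h1 h2
    by_cases hlt : (o.length : Int) < n
    · have hF : F ≠ 0 := by
        intro h
        subst h
        simp [pvCat] at h1
        omega
      obtain ⟨F', rfl⟩ : ∃ F', F = F' + 1 := ⟨F - 1, by omega⟩
      simp only [pvALoop, if_pos hlt]
      rw [ih F' (o ++ List.replicate ((v ^ l).toNat) (l : Int)) (l + 1)
          (by simp only [pvCat, List.length_append, List.length_replicate] at h1 ⊢; omega)
          (by omega)]
      simp only [pvCat, List.append_assoc]
    · simp only [pvALoop, if_neg hlt]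
      have hle : n.toNat ≤ o.length := by omega
      rw [List.take_append_of_le_length hle]

-- B's level function decodes the index: it returns the element of the block concatenation
theorem pvLevel_get (v : Int) (hv : 1 ≤ v) :
    ∀ (f F l : Nat) (i : Nat) (h : i < (pvCat v l F).length), i < f →
      pvLevel v f (i : Int) l = (pvCat v l F)[i]'h := by
  intro f
  induction f with
  | zero => intro F l i h hf; omega
  | succ f ih =>
    intro F l i h hf
    have hF : F ≠ 0 := by
      intro h0; subst h0; simp [pvCat] at h
    obtain ⟨F', rfl⟩ : ∃ F', F = F' + 1 := ⟨F - 1, by omega⟩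
    have hpow : (1 : Int) ≤ v ^ l := one_le_pow₀ hv
    have htn : ((v ^ l).toNat : Int) = v ^ l := Int.toNat_of_nonneg (by omega)
    simp only [pvCat, List.length_append, List.length_replicate] at h
    by_cases hi : i < (v ^ l).toNat
    · have hcond : ¬ v ^ l ≤ (i : Int) := by omega
      simp only [pvLevel, if_neg hcond, pvCat]
      rw [List.getElem_append_left (by simpa using hi)]
      simp
    · have hcond : v ^ l ≤ (i : Int) := by omega
      simp only [pvLevel, if_pos hcond, pvCat]
      have hi' : i - (v ^ l).toNat < (pvCat v (l + 1) F').length := by omega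
      have hcast : (i : Int) - v ^ l = ((i - (v ^ l).toNat : Nat) : Int) := by
        omega
      rw [hcast, ih F' (l + 1) (i - (v ^ l).toNat) hi' (by omega)]
      rw [List.getElem_append_right (by simpa using hi)]
      simp

theorem pv_main (v n : Int) (hpre : Pre_optimal_coding v n) :
    optimal_coding v n = optimal_coding_alt v n := by
  by_cases hn0 : n ≤ 0
  · -- nr_messages ≤ 0: A slices [0] to an empty list, B maps over an empty range
    have h0 : n.toNat = 0 := by omega
    have hA1 : pvALoop v n (2 * n.toNat + 3) [0] 1 = [0] := by
      rw [h0]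
      show pvALoop v n (0 + 3) [0] 1 = [0]
      simp only [pvALoop]
      rw [if_neg (by simp; omega)]
    unfold optimal_coding optimal_coding_alt
    rw [hA1, h0]
    simp only [List.range_zero, List.map_nil]
    rcases lt_or_eq_of_le hn0 with hlt | rfl
    · obtain ⟨k, hk, rfl⟩ : ∃ k : Nat, 0 < k ∧ n = -(k : Int) := ⟨(-n).toNat, by omega, by omega⟩
      rw [PySem.List.slice_to_neg_natCast _ _ hk]
      simp [Nat.sub_eq_zero_of_le hk]
    · rw [PySem.List.slice_to _ le_rfl]
      simp
  · by_cases hv : 1 ≤ v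
    · -- main case: vocab_size ≥ 1
      have hn : 0 ≤ n := by omega
      have hlen : n.toNat ≤ (pvCat v 0 (2 * n.toNat + 3)).length := by
        have := pvCat_len_ge v hv (2 * n.toNat + 3) 0
        omega
      have hcat0 : pvCat v 0 (2 * n.toNat + 3) = ([0] : List Int) ++ pvCat v 1 (2 * n.toNat + 2) := by
        show List.replicate ((v ^ 0).toNat) ((0 : Nat) : Int) ++ pvCat v 1 (2 * n.toNat + 2) = _
        norm_num
      have hA : optimal_coding v n = (pvCat v 0 (2 * n.toNat + 3)).take n.toNat := by
        unfold optimal_coding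
        rw [PySem.List.slice_to _ hn, hcat0]
        refine pvALoop_take v n (2 * n.toNat + 3) (2 * n.toNat + 2) [0] 1 ?_ (by omega)
        rw [hcat0] at hlen
        simp at hlen ⊢; omega
      rw [hA]
      unfold optimal_coding_alt
      apply List.ext_getElem
      · simp; omega
      · intro i h1 h2
        simp only [List.getElem_take, List.getElem_map, List.getElem_range]
        have hi : i < (pvCat v 0 (2 * n.toNat + 3)).length := by
          simp at h1; omega
        rw [pvLevel_get v hv (i + 1) (2 * n.toNat + 3) 0 i hi (by omega)]
    · -- vocab_size ≤ 0, so Pre_ forces nr_messages = 1: both return [0]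
      have hn1 : n = 1 := by rcases hpre with h | h <;> omega
      subst hn1
      have hA1 : pvALoop v 1 (2 * (1 : Int).toNat + 3) [0] 1 = [0] := by
        show pvALoop v 1 (2 + 3) [0] 1 = [0]
        simp only [pvALoop]
        rw [if_neg (by simp)]
      unfold optimal_coding optimal_coding_alt
      rw [hA1, PySem.List.slice_to _ (by norm_num)]
      show _ = (List.range 1).map _
      simp only [List.range_one, List.map_cons, List.map_nil]
      have : pvLevel v 1 ((0 : Nat) : Int) 0 = 0 := by
        simp [pvLevel]
      rw [this]
      rfl

-- ===== VERDICT (by name: the statement is the Claim_ definition above) =====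
theorem optimal_coding_spec : Claim_equal_optimal_coding := by
  intro v n _ hpre
  unfold Spec_optimal_coding
  exact pv_main v n hpre
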